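-- pv_equiv track=rewrite | github.com/mmatos93/ATAL-2021.1 | menorfaltante.py | menorfaltante
-- ===== SOURCE A (Python) =====
-- def menorfaltante(A, ini, fim):
--
--     #caso base
--     if (ini > fim):
--
--         return ini
--
--     meio = (ini + fim)//2
--
--     if (A[meio] == meio):
--
--         return menorfaltante(A, meio+1, fim)
--
--     else:
--
--         return menorfaltante(A, ini, meio-1)
-- ===== SOURCE B (Python) =====
-- def menorfaltante(A, ini, fim):
--     # Iterative binary search: same probes as the recursion, return ini at exit.
--     while ini <= fim:
--         meio = (ini + fim) // 2
--         if A[meio] == meio: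
--             ini = meio + 1
--         else:
--             fim = meio - 1
--     return ini
-- ===== Notes on version B (the rewrite author's own statement) =====
-- stated objective: simpler
-- what changed: Replaced the recursive binary search by an iterative while-loop over mutable bounds (same midpoints, returns ini at exit), removing recursion and call-stack depth.
-- outside the precondition, e.g. on menorfaltante([5], -1, 2): A returns -1, B returns -1; on menorfaltante([0], 0, 5): A raises IndexError, B raises IndexError
import Mathlib
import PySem

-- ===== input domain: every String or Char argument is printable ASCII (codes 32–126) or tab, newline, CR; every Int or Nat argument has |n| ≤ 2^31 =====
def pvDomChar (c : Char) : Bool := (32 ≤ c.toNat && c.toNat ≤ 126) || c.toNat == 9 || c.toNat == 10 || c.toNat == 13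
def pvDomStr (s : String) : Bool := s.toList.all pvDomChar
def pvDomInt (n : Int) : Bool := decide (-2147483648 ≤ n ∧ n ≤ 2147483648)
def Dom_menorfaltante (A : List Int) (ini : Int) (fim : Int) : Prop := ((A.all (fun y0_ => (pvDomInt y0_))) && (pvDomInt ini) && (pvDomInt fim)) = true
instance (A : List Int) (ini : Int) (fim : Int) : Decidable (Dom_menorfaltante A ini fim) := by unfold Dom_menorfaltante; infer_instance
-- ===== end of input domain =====

-- B replaces the recursive binary search by an iterative while-loop over the bounds (same probes); objective: simpler.


-- ===== PORT A =====
-- Literal port of A's recursion; A[meio] is PySem.List.pyGet? (none = IndexError, excluded by Pre_; 0 is a dummy there).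
def menorfaltante (A : List Int) (ini : Int) (fim : Int) : Int :=
  if ini > fim then ini
  else
    let meio := PySem.Int.floordiv (ini + fim) 2
    match PySem.List.pyGet? A meio with
    | some v => if v = meio then menorfaltante A (meio + 1) fim else menorfaltante A ini (meio - 1)
    | none => 0  -- IndexError in Python; outside Pre_
termination_by (fim + 1 - ini).toNat
decreasing_by
  all_goals
    have h := PySem.Int.floordiv_two_mid_bounds (lo := ini) (hi := fim) (by omega)
    omega

-- ===== PORT B =====
-- B's while-loop as a fuel-driven state machine over the pair (ini, fim); fuel = interval width bounds the iterations.
def menorfaltanteLoop (A : List Int) : Nat → Int × Int → Int × Int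
  | 0, s => s
  | n + 1, (ini, fim) =>
    if ini ≤ fim then
      let meio := PySem.Int.floordiv (ini + fim) 2
      menorfaltanteLoop A n
        (if PySem.List.pyGet? A meio = some meio then (meio + 1, fim) else (ini, meio - 1))
    else (ini, fim)

def menorfaltante_alt (A : List Int) (ini : Int) (fim : Int) : Int :=
  (menorfaltanteLoop A (fim + 1 - ini).toNat (ini, fim)).1

-- ===== PRECONDITION & SPEC =====
-- Pre_ excludes nonempty ranges whose bounds leave A's valid (Python, possibly negative) index range:
-- there the probe sequence may hit an IndexError; on some such inputs A still returns, and B returns the same value (see cites).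
def Pre_menorfaltante (A : List Int) (ini : Int) (fim : Int) : Prop :=
  ini > fim ∨ (-(A.length : Int) ≤ ini ∧ fim < (A.length : Int))
instance (A : List Int) (ini : Int) (fim : Int) : Decidable (Pre_menorfaltante A ini fim) := by
  unfold Pre_menorfaltante; infer_instance
def pvWitness_menorfaltante : List Int × Int × Int := ([0, 1, 3], 0, 2)
def Spec_menorfaltante (A : List Int) (ini : Int) (fim : Int) (out : Int) : Prop := out = menorfaltante_alt A ini fim
instance (A : List Int) (ini : Int) (fim : Int) (out : Int) : Decidable (Spec_menorfaltante A ini fim out) := by unfold Spec_menorfaltante; infer_instance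

-- ===== CLAIM (what is proved, stated in full; the proofs are below) =====
def Claim_equal_menorfaltante : Prop := ∀ (A : List Int) (ini : Int) (fim : Int), Dom_menorfaltante A ini fim → Pre_menorfaltante A ini fim → Spec_menorfaltante A ini fim (menorfaltante A ini fim)

-- ===== LEMMAS AND PROOFS =====
-- With enough fuel, and bounds inside the valid index range, the loop computes A's recursion.
theorem menorfaltanteLoop_eq (A : List Int) :
    ∀ (n : Nat) (ini fim : Int), (fim + 1 - ini).toNat ≤ n →
      Pre_menorfaltante A ini fim →
      (menorfaltanteLoop A n (ini, fim)).1 = menorfaltante A ini fim := by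
  intro n
  induction n with
  | zero =>
    intro ini fim h _
    have : ini > fim := by omega
    simp [menorfaltanteLoop, menorfaltante, this]
  | succ n ih =>
    intro ini fim h hpre
    by_cases hle : ini ≤ fim
    · have hmid := PySem.Int.floordiv_two_mid_bounds (lo := ini) (hi := fim) hle
      have hb : -(A.length : Int) ≤ ini ∧ fim < (A.length : Int) := by
        rcases hpre with h' | h'
        · omega
        · exact h'
      have hrange : PySem.Raise.InRange A.length (PySem.Int.floordiv (ini + fim) 2) := by
        constructor <;> omega
      rw [menorfaltante]
      rw [menorfaltanteLoop]
      simp only [hle, if_true, if_neg (by omega : ¬ ini > fim)]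
      set meio := PySem.Int.floordiv (ini + fim) 2 with hmeio
      cases hg : PySem.List.pyGet? A meio with
      | none =>
        rw [PySem.List.pyGet?_eq_none_iff] at hg
        exact absurd hrange hg
      | some v =>
        change _ = if v = meio then menorfaltante A (meio + 1) fim
                   else menorfaltante A ini (meio - 1)
        by_cases hv : v = meio
        · rw [if_pos (by simp [hv]), if_pos hv]
          exact ih (meio + 1) fim (by omega) (Or.inr ⟨by omega, hb.2⟩)
        · rw [if_neg (by simp [hv]), if_neg hv]
          by_cases hle2 : ini ≤ meio - 1
          · exact ih ini (meio - 1) (by omega) (Or.inr ⟨hb.1, by omega⟩)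
          · exact ih ini (meio - 1) (by omega) (Or.inl (by omega))
    · rw [menorfaltante, menorfaltanteLoop]
      simp [hle, show ini > fim by omega]

-- ===== VERDICT (by name: the statement is the Claim_ definition above) =====
theorem menorfaltante_spec : Claim_equal_menorfaltante := by
  intro A ini fim _ hpre
  unfold Spec_menorfaltante menorfaltante_alt
  exact (menorfaltanteLoop_eq A _ ini fim le_rfl hpre).symm
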